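-- pv_equiv track=rewrite | github.com/amitavabasu/PythonProjects | ds-alogo/HeapSort.py | extract_max_for_all
-- ===== SOURCE A (Python) =====
-- import math
--
-- def swap(arr, i, j):
--     arr[i], arr[j] = arr[j], arr[i]
--
-- def extract_max_for_all(arr):
--     if arr is None: return arr
--     n = len(arr)
--     if n <= 1: return arr
--     last = n-1
--     h = int(math.log2(n))
--     while last > 0:
--         swap(arr, last, 0)
--         last -= 1
--         curr_index = 0
--         while 0 <= curr_index <= last:
--             l_index = 2* curr_index + 1
--             r_index = 2* curr_index + 2
--             index_to_swap = -1
--             if l_index <= last and r_index <= last: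
--                 if arr[l_index] > arr[r_index]:
--                     index_to_swap = l_index
--                 else:
--                     index_to_swap = r_index
--             elif l_index <= last:
--                 index_to_swap = l_index
--             elif r_index <= last:
--                 index_to_swap = r_index
--             else:
--                 break
--             if arr[index_to_swap] > arr[curr_index]:
--                 swap(arr, curr_index, index_to_swap)
--                 curr_index = index_to_swap
--             else:
--                 break
--     return arr
-- ===== SOURCE B (Python) =====
-- def _sift_down(arr, i, last):
--     l, r = 2 * i + 1, 2 * i + 2
--     if r <= last:
--         c = l if arr[l] > arr[r] else r
--     elif l <= last:
--         c = l
--     else: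
--         return
--     if arr[c] > arr[i]:
--         arr[i], arr[c] = arr[c], arr[i]
--         _sift_down(arr, c, last)
--
-- def extract_max_for_all(arr):
--     if arr is None:
--         return arr
--     n = len(arr)
--     for last in range(n - 1, 0, -1):
--         arr[0], arr[last] = arr[last], arr[0]
--         _sift_down(arr, 0, last - 1)
--     return arr
-- ===== Notes on version B (the rewrite author's own statement) =====
-- stated objective: alternative
-- what changed: A's inner while-loop sift is replaced by a recursive sift-down helper that tests the right child first (one bounds test instead of A's three-way chain), and the outer while-loop by a for over range(n-1,0,-1); equivalence is about the return value (both mutate the list in place).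
import Mathlib
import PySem

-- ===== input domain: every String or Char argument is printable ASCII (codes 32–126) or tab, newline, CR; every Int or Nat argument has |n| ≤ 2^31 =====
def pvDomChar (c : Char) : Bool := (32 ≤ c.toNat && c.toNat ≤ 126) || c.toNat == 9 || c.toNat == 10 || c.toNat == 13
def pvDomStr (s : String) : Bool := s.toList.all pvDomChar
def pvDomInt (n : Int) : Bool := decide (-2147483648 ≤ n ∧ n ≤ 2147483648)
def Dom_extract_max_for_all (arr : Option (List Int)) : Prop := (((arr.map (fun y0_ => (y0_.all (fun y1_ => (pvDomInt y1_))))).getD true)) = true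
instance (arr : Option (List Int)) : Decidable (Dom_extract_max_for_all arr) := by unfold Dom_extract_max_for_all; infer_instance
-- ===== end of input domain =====

-- B replaces A's inner while-loop by a recursive sift-down helper (right-child-first
-- selection, one bounds test per level instead of A's three-way chain) and the outer
-- while by a for over range(n-1,0,-1). Both Pythons mutate the list in place; the
-- equivalence proved here is about the RETURN value.

-- ===== PORT A =====
-- swap(arr, i, j) / the tuple swap in B; indices used are always in range, so List.set/getD are exact here
def pvSwapA (arr : List Int) (i j : Nat) : List Int :=
  (arr.set i (arr.getD j 0)).set j (arr.getD i 0)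

-- A's inner 'while 0 <= curr_index <= last' loop (curr_index is always ≥ 0)
def pvInnerA (arr : List Int) (curr last : Nat) : List Int :=
  if curr ≤ last then
    if 2*curr+1 ≤ last ∧ 2*curr+2 ≤ last then
      if arr.getD (2*curr+1) 0 > arr.getD (2*curr+2) 0 then
        -- index_to_swap = l_index
        if arr.getD (2*curr+1) 0 > arr.getD curr 0 then
          pvInnerA (pvSwapA arr curr (2*curr+1)) (2*curr+1) last
        else arr
      else
        -- index_to_swap = r_index
        if arr.getD (2*curr+2) 0 > arr.getD curr 0 then
          pvInnerA (pvSwapA arr curr (2*curr+2)) (2*curr+2) last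
        else arr
    else if 2*curr+1 ≤ last then
      if arr.getD (2*curr+1) 0 > arr.getD curr 0 then
        pvInnerA (pvSwapA arr curr (2*curr+1)) (2*curr+1) last
      else arr
    else if 2*curr+2 ≤ last then
      if arr.getD (2*curr+2) 0 > arr.getD curr 0 then
        pvInnerA (pvSwapA arr curr (2*curr+2)) (2*curr+2) last
      else arr
    else arr
  else arr
termination_by last + 1 - curr
decreasing_by all_goals omega

-- A's outer 'while last > 0' loop
def pvOuterA (arr : List Int) (last : Nat) : List Int :=
  if last > 0 then
    pvOuterA (pvInnerA (pvSwapA arr last 0) 0 (last - 1)) (last - 1)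
  else arr

-- 'h = int(math.log2(n))' is unused by A and therefore not ported
def extract_max_for_all (arr : Option (List Int)) : Option (List Int) :=
  match arr with
  | none => none
  | some a => if a.length ≤ 1 then some a else some (pvOuterA a (a.length - 1))

-- ===== PORT B =====
-- child selection of _sift_down: right-child-first if-chain, None = early return
def pvChildB (arr : List Int) (i last : Nat) : Option Nat :=
  if 2*i+2 ≤ last then
    some (if arr.getD (2*i+1) 0 > arr.getD (2*i+2) 0 then 2*i+1 else 2*i+2)
  else if 2*i+1 ≤ last then some (2*i+1)
  else none

theorem pvChildB_gt (arr : List Int) (i last c : Nat)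
    (h : pvChildB arr i last = some c) : i < c ∧ c ≤ last := by
  unfold pvChildB at h
  split_ifs at h <;> simp_all <;> omega

-- recursive _sift_down helper
def pvSiftB (arr : List Int) (i last : Nat) : List Int :=
  match h : pvChildB arr i last with
  | none => arr
  | some c =>
    if arr.getD c 0 > arr.getD i 0 then pvSiftB (pvSwapA arr i c) c last else arr
termination_by last + 1 - i
decreasing_by have := pvChildB_gt arr i last c h; omega

-- for last in range(n-1, 0, -1): … ; (List.range' 1 (n-1)).reverse = [n-1, …, 1]
def extract_max_for_all_alt (arr : Option (List Int)) : Option (List Int) :=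
  match arr with
  | none => none
  | some a =>
    some (((List.range' 1 (a.length - 1)).reverse).foldl
      (fun acc last => pvSiftB (pvSwapA acc last 0) 0 (last - 1)) a)

-- ===== PRECONDITION & SPEC =====
def Spec_extract_max_for_all (arr : Option (List Int)) (out : Option (List Int)) : Prop := out = extract_max_for_all_alt arr
instance (arr : Option (List Int)) (out : Option (List Int)) : Decidable (Spec_extract_max_for_all arr out) := by unfold Spec_extract_max_for_all; infer_instance

-- ===== CLAIM (what is proved, stated in full; the proofs are below) =====
def Claim_equal_extract_max_for_all : Prop := ∀ (arr : Option (List Int)), Dom_extract_max_for_all arr → Spec_extract_max_for_all arr (extract_max_for_all arr)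

-- ===== LEMMAS AND PROOFS =====

theorem pvRange'_concat (s n : Nat) : List.range' s (n+1) = List.range' s n ++ [s+n] := by
  induction n generalizing s with
  | zero => simp [List.range'_succ]
  | succ k ih =>
    rw [List.range'_succ, ih (s+1), List.range'_succ]
    simp; omega

theorem pvSiftB_none (arr : List Int) (i last : Nat) (h : pvChildB arr i last = none) :
    pvSiftB arr i last = arr := by
  rw [pvSiftB.eq_def]; split <;> simp_all

theorem pvSiftB_some (arr : List Int) (i last c : Nat) (h : pvChildB arr i last = some c) :
    pvSiftB arr i last =
      if arr.getD c 0 > arr.getD i 0 then pvSiftB (pvSwapA arr i c) c last else arr := by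
  rw [pvSiftB.eq_def]; split <;> simp_all

theorem pvSift_eq (n : Nat) : ∀ (arr : List Int) (curr last : Nat),
    last + 1 - curr ≤ n → pvInnerA arr curr last = pvSiftB arr curr last := by
  induction n with
  | zero =>
    intro arr curr last hn
    -- curr > last: A's guard fails; B selects no child
    have hc : last < curr := by omega
    have hnone : pvChildB arr curr last = none := by
      unfold pvChildB; split_ifs <;> first | omega | rfl
    rw [pvInnerA, pvSiftB_none _ _ _ hnone]
    simp [Nat.not_le.mpr hc]
  | succ n ih =>
    intro arr curr last hn
    rw [pvInnerA]
    by_cases hcl : curr ≤ last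
    · by_cases h2 : 2*curr+2 ≤ last
      · have hch : pvChildB arr curr last
            = some (if arr.getD (2*curr+1) 0 > arr.getD (2*curr+2) 0 then 2*curr+1 else 2*curr+2) := by
          unfold pvChildB; rw [if_pos h2]
        by_cases hc : arr.getD (2*curr+1) 0 > arr.getD (2*curr+2) 0
        · rw [if_pos hc] at hch
          rw [pvSiftB_some _ _ _ _ hch]
          split_ifs <;> first | rfl | omega | (exact ih _ _ _ (by omega))
        · rw [if_neg hc] at hch
          rw [pvSiftB_some _ _ _ _ hch]
          split_ifs <;> first | rfl | omega | (exact ih _ _ _ (by omega))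
      · by_cases h1 : 2*curr+1 ≤ last
        · have hch : pvChildB arr curr last = some (2*curr+1) := by
            unfold pvChildB; rw [if_neg h2, if_pos h1]
          rw [pvSiftB_some _ _ _ _ hch]
          split_ifs <;> first | rfl | omega | (exact ih _ _ _ (by omega))
        · have hch : pvChildB arr curr last = none := by
            unfold pvChildB; rw [if_neg h2, if_neg h1]
          rw [pvSiftB_none _ _ _ hch]
          split_ifs <;> first | rfl | omega
    · have hnone : pvChildB arr curr last = none := by
        unfold pvChildB; split_ifs <;> first | omega | rfl
      rw [pvSiftB_none _ _ _ hnone]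
      simp [hcl]

theorem pvOuter_eq : ∀ (last : Nat) (arr : List Int),
    pvOuterA arr last =
      ((List.range' 1 last).reverse).foldl
        (fun acc l => pvSiftB (pvSwapA acc l 0) 0 (l - 1)) arr := by
  intro last
  induction last with
  | zero => intro arr; rw [pvOuterA]; simp
  | succ k ih =>
    intro arr
    rw [pvOuterA]
    have hr : (List.range' 1 (k+1)).reverse
        = (k+1) :: (List.range' 1 k).reverse := by
      rw [pvRange'_concat 1 k]; simp [Nat.add_comm]
    simp only [hr, List.foldl_cons, Nat.add_sub_cancel]
    rw [ih, pvSift_eq (k+1) _ 0 k (by omega)]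
    simp

-- ===== VERDICT (by name: the statement is the Claim_ definition above) =====
theorem extract_max_for_all_spec : Claim_equal_extract_max_for_all := by
  intro arr _
  unfold Spec_extract_max_for_all extract_max_for_all extract_max_for_all_alt
  match arr with
  | none => rfl
  | some a =>
    simp only
    by_cases h : a.length ≤ 1
    · have : a.length - 1 = 0 := by omega
      simp [h, this]
    · simp [h, pvOuter_eq]
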